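-- pv_equiv track=rewrite | github.com/rcsm89/python-repo | roteiro7/SeqInteirosPares.py | paresAteMim
-- ===== SOURCE A (Python) =====
-- def paresAteMim(num, res = ""):
--     if num == 0:
--         #Crescente
--         return (res+"0\n")
--         #Decrescente
--         #return ("0\n"+res)
--     if(((num)%2) == 0):
--         #Crescente
--         #res = str(num)+"\n" + res
--         #Decrescente
--         res = res + str(num)+"\n"
--         return paresAteMim(num-1, res)
--     else:
--         return paresAteMim(num-1, res)
-- ===== SOURCE B (Python) =====
-- def paresAteMim(num, res=""):
--     # closed-form: descending even numbers from num down to 0, joined once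
--     return res + "".join(str(k) + "\n" for k in range(num - num % 2, -1, -2))
-- ===== Notes on version B (the rewrite author's own statement) =====
-- stated objective: faster
-- what changed: Replaced the descending recursion with its string-accumulator argument by a one-line closed form: range(num - num%2, -1, -2) joined once onto res.
import Mathlib
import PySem

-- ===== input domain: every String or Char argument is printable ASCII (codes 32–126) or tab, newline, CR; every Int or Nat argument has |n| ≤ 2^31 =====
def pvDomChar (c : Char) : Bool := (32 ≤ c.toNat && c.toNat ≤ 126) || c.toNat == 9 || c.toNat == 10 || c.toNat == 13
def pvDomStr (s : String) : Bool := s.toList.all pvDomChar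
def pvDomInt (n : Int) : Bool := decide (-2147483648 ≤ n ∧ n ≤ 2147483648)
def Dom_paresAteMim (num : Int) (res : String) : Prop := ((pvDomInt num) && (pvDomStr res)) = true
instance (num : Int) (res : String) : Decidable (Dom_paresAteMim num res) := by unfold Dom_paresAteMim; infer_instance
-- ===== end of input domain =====

-- B builds the even-number lines with one closed-form range and a single join instead
-- of A's descending recursion with a string-accumulator argument (objective: simpler).

-- ===== PORT A =====
-- A recurses num → num-1 → … → 0; for num ≥ 0 (Pre_) this is exactly structural
-- recursion on num.toNat, done by the helper below (the countdown value is m+1).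
def paresAteMimGo : Nat → String → String
  | 0, res => res ++ "0\n"
  | Nat.succ m, res =>
    if PySem.Int.mod (Int.ofNat (m + 1)) 2 == 0 then
      paresAteMimGo m (res ++ PySem.Int.toStr (Int.ofNat (m + 1)) ++ "\n")
    else
      paresAteMimGo m res

def paresAteMim (num : Int) (res : String) : String :=
  paresAteMimGo num.toNat res

-- ===== PORT B =====
def paresAteMim_alt (num : Int) (res : String) : String :=
  res ++ String.join ((PySem.List.pyRange (num - PySem.Int.mod num 2) (-1) (-2)).map
    (fun k => PySem.Int.toStr k ++ "\n"))

-- ===== PRECONDITION & SPEC =====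
-- Pre_ excludes num < 0: there A's recursion never reaches 0 and raises RecursionError.
def Pre_paresAteMim (num : Int) (res : String) : Prop := 0 ≤ num
instance (num : Int) (res : String) : Decidable (Pre_paresAteMim num res) := by
  unfold Pre_paresAteMim; infer_instance

def pvWitness_paresAteMim : Int × String := (4, "")

def Spec_paresAteMim (num : Int) (res : String) (out : String) : Prop := out = paresAteMim_alt num res
instance (num : Int) (res : String) (out : String) : Decidable (Spec_paresAteMim num res out) := by unfold Spec_paresAteMim; infer_instance

-- ===== CLAIM (what is proved, stated in full; the proofs are below) =====
def Claim_equal_paresAteMim : Prop := ∀ (num : Int) (res : String), Dom_paresAteMim num res → Pre_paresAteMim num res → Spec_paresAteMim num res (paresAteMim num res)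

-- ===== LEMMAS AND PROOFS =====

theorem join_cons (a : String) (l : List String) :
    String.join (a :: l) = a ++ String.join l := by
  induction l generalizing a with
  | nil => simp [String.join]
  | cons b l ih =>
      show (b :: l).foldl (· ++ ·) ("" ++ a) = a ++ String.join (b :: l)
      show l.foldl (· ++ ·) (("" ++ a) ++ b) = a ++ String.join (b :: l)
      have h1 : l.foldl (· ++ ·) (("" ++ a) ++ b) = String.join ((a ++ b) :: l) := by
        simp [String.join]
      rw [h1, ih (a ++ b), ih b, String.append_assoc]

-- range(a, -1, -2) for 0 ≤ a peels its first element.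
theorem pyRange_down2_cons (a : Int) (h : 0 ≤ a) :
    PySem.List.pyRange a (-1) (-2) = a :: PySem.List.pyRange (a - 2) (-1) (-2) := by
  rw [PySem.List.pyRange_of_neg a (-1) (by norm_num),
      PySem.List.pyRange_of_neg (a - 2) (-1) (by norm_num)]
  have hlt : (-1 : Int) < a := by omega
  rw [if_pos hlt]
  by_cases h2 : (-1 : Int) < a - 2
  · rw [if_pos h2]
    have hn : ((a - -1 + - -2 - 1) / - -2).toNat = ((a - 2 - -1 + - -2 - 1) / - -2).toNat + 1 := by
      have e1 : (a - -1 + - -2 - 1) / - -2 = (a + 2) / 2 := by norm_num; omega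
      have e2 : (a - 2 - -1 + - -2 - 1) / - -2 = a / 2 := by norm_num; omega
      rw [e1, e2]; omega
    rw [hn, List.range_succ_eq_map]
    simp only [List.map_cons, List.map_map]
    congr 1
    · push_cast; ring
    · apply List.map_congr_left
      intro k _
      simp only [Function.comp_apply, Nat.succ_eq_add_one]
      push_cast; ring
  · -- a = 0 or a = 1 : right range empty, left range a single element
    rw [if_neg h2]
    have hn : ((a - -1 + - -2 - 1) / - -2).toNat = 1 := by
      have e1 : (a - -1 + - -2 - 1) / - -2 = (a + 2) / 2 := by norm_num; omega
      rw [e1]; omega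
    rw [hn]
    simp

-- The tail string that B appends, as a function of a Nat countdown.
def pvTail (n : Nat) : String :=
  String.join ((PySem.List.pyRange ((n : Int) - PySem.Int.mod (n : Int) 2) (-1) (-2)).map
    (fun k => PySem.Int.toStr k ++ "\n"))

theorem mod_two_natCast (n : Nat) : PySem.Int.mod (n : Int) 2 = (n : Int) % 2 := by
  rw [PySem.Int.mod_eq_emod_of_pos (by norm_num : (0 : Int) < 2)]

theorem pvTail_succ_even (m : Nat) (h : ((m : Int) + 1) % 2 = 0) :
    pvTail (m + 1) = PySem.Int.toStr ((m : Int) + 1) ++ "\n" ++ pvTail m := by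
  unfold pvTail
  rw [mod_two_natCast, mod_two_natCast]
  push_cast
  rw [h]
  have hm : (m : Int) % 2 = 1 := by omega
  rw [hm]
  have : ((m : Int) + 1 - 0) = (m : Int) + 1 := by ring
  rw [this]
  rw [pyRange_down2_cons ((m : Int) + 1) (by positivity)]
  have : ((m : Int) + 1 - 2) = (m : Int) - 1 := by ring
  rw [this, List.map_cons, join_cons, String.append_assoc]

theorem pvTail_succ_odd (m : Nat) (h : ((m : Int) + 1) % 2 = 1) :
    pvTail (m + 1) = pvTail m := by
  unfold pvTail
  rw [mod_two_natCast, mod_two_natCast]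
  push_cast
  rw [h]
  have hm : (m : Int) % 2 = 0 := by omega
  rw [hm]
  norm_num

theorem paresAteMimGo_eq (n : Nat) : ∀ (res : String),
    paresAteMimGo n res = res ++ pvTail n := by
  induction n with
  | zero =>
      intro res
      have : pvTail 0 = "0\n" := by decide
      simp [paresAteMimGo, this]
  | succ m ih =>
      intro res
      rcases PySem.Int.mod_two_eq (Int.ofNat (m + 1)) with h | h
      · have he : ((m : Int) + 1) % 2 = 0 := by
          have h' := h
          simp only [Int.ofNat_eq_natCast] at h'
          rw [mod_two_natCast (m + 1)] at h'
          push_cast at h'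
          exact h'
        rw [paresAteMimGo, h]
        simp only [beq_self_eq_true, if_true]
        rw [ih, pvTail_succ_even m he]
        simp [String.append_assoc]
      · have ho : ((m : Int) + 1) % 2 = 1 := by
          have h' := h
          simp only [Int.ofNat_eq_natCast] at h'
          rw [mod_two_natCast (m + 1)] at h'
          push_cast at h'
          exact h'
        rw [paresAteMimGo, h]
        norm_num
        rw [ih, pvTail_succ_odd m ho]

-- ===== VERDICT (by name: the statement is the Claim_ definition above) =====
theorem paresAteMim_spec : Claim_equal_paresAteMim := by
  intro num res _ hpre
  unfold Spec_paresAteMim paresAteMim paresAteMim_alt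
  have hnum : (num.toNat : Int) = num := Int.toNat_of_nonneg hpre
  have h2 := paresAteMimGo_eq num.toNat res
  unfold pvTail at h2
  rw [hnum] at h2
  exact h2
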